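-- pv_equiv track=rewrite | github.com/Sathish8472/DSA-Problems | 2503-longest-subarray-with-maximum-bitwise-and/2503-longest-subarray-with-maximum-bitwise-and.py | longestSubarray1
-- ===== SOURCE A (Python) =====
-- from typing import List
--
-- def longestSubarray1(nums: List[int]) -> int:
--
--     max_len = 0
--     max_and = 0
--     n = len(nums)
--
--     for i in range(n):
--         current_and = nums[i]
--         for j in range(i, n):
--             current_and &= nums[j]
--             if current_and > max_and:
--                 max_and = current_and
--                 max_len = j - i + 1
--             elif current_and == max_and:
--                 max_len = max(max_len, j - i + 1)
--
--     return max_len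
-- ===== SOURCE B (Python) =====
-- def longestSubarray1(nums):
--     max_len = 0
--     max_and = 0
--     cur = {}  # AND value of a subarray ending at the previous index -> max length
--     for x in nums:
--         nxt = {x: 1}
--         for v, L in cur.items():
--             w = v & x
--             if w not in nxt or nxt[w] < L + 1:
--                 nxt[w] = L + 1
--         cur = nxt
--         for v, L in cur.items():
--             if v > max_and:
--                 max_and = v
--                 max_len = L
--             elif v == max_and:
--                 max_len = max(max_len, L)
--     return max_len
-- ===== Notes on version B (the rewrite author's own statement) =====
-- stated objective: faster
-- what changed: Replaces the O(n^2) scan over all start indices by a single left-to-right pass that maintains a small dictionary mapping each distinct bitwise-AND value of subarrays ending at the current index to the longest such subarray (the dictionary has at most one entry per bit, so ~32 entries).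
import Mathlib
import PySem

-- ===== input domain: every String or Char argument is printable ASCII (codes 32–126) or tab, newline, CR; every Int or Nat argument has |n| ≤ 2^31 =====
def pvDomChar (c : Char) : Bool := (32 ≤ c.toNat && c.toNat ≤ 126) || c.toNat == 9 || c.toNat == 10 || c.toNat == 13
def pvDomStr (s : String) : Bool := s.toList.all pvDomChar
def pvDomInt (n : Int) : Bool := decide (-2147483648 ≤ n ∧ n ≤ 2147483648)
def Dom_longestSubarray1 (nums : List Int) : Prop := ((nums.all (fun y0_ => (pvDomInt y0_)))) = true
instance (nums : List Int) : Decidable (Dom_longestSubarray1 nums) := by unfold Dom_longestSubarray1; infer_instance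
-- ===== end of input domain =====

-- B replaces A's O(n^2) double loop by one pass keeping, per distinct AND value of a
-- subarray ending at the current index, the longest such subarray (a small dictionary).

-- ===== PORT A =====
-- inner loop: 'for j in range(i, n)' with state (current_and, max_and, max_len); L is j - i + 1 so far
def pvInnerA (cur ma ml L : Int) : List Int → Int × Int
  | [] => (ma, ml)
  | x :: t =>
    let c := PySem.Int.band cur x
    let L' := L + 1
    if c > ma then pvInnerA c c L' L' t
    else if c = ma then pvInnerA c ma (max ml L') L' t
    else pvInnerA c ma ml L' t

-- outer loop: 'for i in range(n)', current_and initialised to nums[i]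
def pvOuterA (ma ml : Int) : List Int → Int × Int
  | [] => (ma, ml)
  | x :: t =>
    let s := pvInnerA x ma ml 0 (x :: t)
    pvOuterA s.1 s.2 t

def longestSubarray1 (nums : List Int) : Int :=
  (pvOuterA 0 0 nums).2

-- ===== PORT B =====
-- 'nxt = {x: 1}; for v, L in cur.items(): w = v & x; if w not in nxt or nxt[w] < L + 1: nxt[w] = L + 1'
def pvStepB (x : Int) (cur : PySem.Dict Int Int) : PySem.Dict Int Int :=
  cur.items.foldl
    (fun d p =>
      let w := PySem.Int.band p.1 x
      match PySem.Dict.get? d w with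
      | none => d.insert w (p.2 + 1)
      | some u => if u < p.2 + 1 then d.insert w (p.2 + 1) else d)
    (PySem.Dict.insert PySem.Dict.empty x 1)

-- 'if v > max_and: … elif v == max_and: max_len = max(max_len, L)'
def pvUpdB (s p : Int × Int) : Int × Int :=
  if p.1 > s.1 then (p.1, p.2)
  else if p.1 = s.1 then (s.1, max s.2 p.2)
  else s

-- 'for x in nums:' with state (cur, max_and, max_len)
def pvLoopB (cur : PySem.Dict Int Int) (ma ml : Int) : List Int → Int × Int
  | [] => (ma, ml)
  | x :: t =>
    let nxt := pvStepB x cur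
    let s := nxt.items.foldl pvUpdB (ma, ml)
    pvLoopB nxt s.1 s.2 t

def longestSubarray1_alt (nums : List Int) : Int :=
  (pvLoopB PySem.Dict.empty 0 0 nums).2

-- ===== PRECONDITION & SPEC =====
def Spec_longestSubarray1 (nums : List Int) (out : Int) : Prop := out = longestSubarray1_alt nums
instance (nums : List Int) (out : Int) : Decidable (Spec_longestSubarray1 nums out) := by unfold Spec_longestSubarray1; infer_instance

-- ===== CLAIM (what is proved, stated in full; the proofs are below) =====
def Claim_equal_longestSubarray1 : Prop := ∀ (nums : List Int), Dom_longestSubarray1 nums → Spec_longestSubarray1 nums (longestSubarray1 nums)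

-- ===== LEMMAS AND PROOFS =====

-- bitwise AND of `cur` with every element of `l`, left to right
def pvBandF (cur : Int) (l : List Int) : Int := l.foldl PySem.Int.band cur

-- AND of a nonempty list (value on [] never used)
def pvAndL : List Int → Int
  | [] => -1
  | x :: t => pvBandF x t

-- the (AND value, length) pair of a nonempty contiguous subarray
def pvPairOf (t : List Int) : Int × Int := (pvAndL t, (t.length : Int))

-- the order in which both programs compare candidates: larger AND wins, ties by length
def pvLe (a b : Int × Int) : Prop := a.1 < b.1 ∨ (a.1 = b.1 ∧ a.2 ≤ b.2)

-- what both programs compute: the pvLe-greatest of (0,0) and all pairs of nonempty infixes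
def pvGood (l : List Int) (s : Int × Int) : Prop :=
  pvLe (0, 0) s ∧
  (s = (0, 0) ∨ ∃ t, t ≠ [] ∧ t <:+: l ∧ s = pvPairOf t) ∧
  (∀ t, t ≠ [] → t <:+: l → pvLe (pvPairOf t) s)

theorem pvLe_refl (a : Int × Int) : pvLe a a := by
  right; exact ⟨rfl, le_refl _⟩

theorem pvLe_trans {a b c : Int × Int} (h1 : pvLe a b) (h2 : pvLe b c) : pvLe a c := by
  unfold pvLe at *; rcases h1 with h1 | ⟨h1, h1'⟩ <;> rcases h2 with h2 | ⟨h2, h2'⟩ <;> omega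

theorem pvLe_antisymm {a b : Int × Int} (h1 : pvLe a b) (h2 : pvLe b a) : a = b := by
  unfold pvLe at *
  have : a.1 = b.1 ∧ a.2 = b.2 := by
    rcases h1 with h1 | ⟨h1, h1'⟩ <;> rcases h2 with h2 | ⟨h2, h2'⟩ <;> omega
  exact Prod.ext this.1 this.2

theorem pvGood_unique {l : List Int} {s1 s2 : Int × Int}
    (h1 : pvGood l s1) (h2 : pvGood l s2) : s1 = s2 := by
  obtain ⟨z1, w1, u1⟩ := h1
  obtain ⟨z2, w2, u2⟩ := h2
  apply pvLe_antisymm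
  · rcases w1 with rfl | ⟨t, ht, hi, rfl⟩
    · exact z2
    · exact u2 t ht hi
  · rcases w2 with rfl | ⟨t, ht, hi, rfl⟩
    · exact z1
    · exact u1 t ht hi

-- ---- generic facts about the candidate-update fold (pvUpdB) ----

theorem pvUpdB_le_left (s p : Int × Int) : pvLe s (pvUpdB s p) := by
  unfold pvUpdB pvLe; split_ifs <;> simp_all <;> omega

theorem pvUpdB_le_right (s p : Int × Int) : pvLe p (pvUpdB s p) := by
  unfold pvUpdB pvLe; split_ifs <;> simp_all <;> omega

theorem pvUpdB_cases (s p : Int × Int) : pvUpdB s p = s ∨ pvUpdB s p = p := by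
  unfold pvUpdB; split_ifs with h1 h2
  · right; rfl
  · rcases max_choice s.2 p.2 with h | h <;> rw [h]
    · left; rfl
    · right; exact Prod.ext h2.symm rfl
  · left; rfl

theorem pvFold_le_init : ∀ (l : List (Int × Int)) (s : Int × Int), pvLe s (l.foldl pvUpdB s)
  | [], s => pvLe_refl s
  | p :: t, s => pvLe_trans (pvUpdB_le_left s p) (pvFold_le_init t (pvUpdB s p))

theorem pvFold_le_mem : ∀ (l : List (Int × Int)) (s p : Int × Int), p ∈ l → pvLe p (l.foldl pvUpdB s) := by
  intro l
  induction l with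
  | nil => intro s p h; simp at h
  | cons q t ih =>
    intro s p h
    rcases List.mem_cons.mp h with rfl | h
    · exact pvLe_trans (pvUpdB_le_right s p) (pvFold_le_init t (pvUpdB s p))
    · exact ih _ p h

theorem pvFold_cases : ∀ (l : List (Int × Int)) (s : Int × Int),
    l.foldl pvUpdB s = s ∨ (l.foldl pvUpdB s) ∈ l := by
  intro l
  induction l with
  | nil => intro s; left; rfl
  | cons q t ih =>
    intro s
    rcases ih (pvUpdB s q) with h | h
    · rw [List.foldl_cons, h]
      rcases pvUpdB_cases s q with h' | h'
      · left; exact h'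
      · right; rw [h']; exact List.mem_cons_self
    · right; exact List.mem_cons_of_mem q h

-- ---- side A: the inner loop is the update fold over the prefix pairs ----

def pvPrefPairs (cur L : Int) : List Int → List (Int × Int)
  | [] => []
  | x :: t => (PySem.Int.band cur x, L + 1) :: pvPrefPairs (PySem.Int.band cur x) (L + 1) t

theorem pvInnerA_eq_fold : ∀ (l : List Int) (cur ma ml L : Int),
    pvInnerA cur ma ml L l = (pvPrefPairs cur L l).foldl pvUpdB (ma, ml) := by
  intro l
  induction l with
  | nil => intro cur ma ml L; rfl
  | cons x t ih =>
    intro cur ma ml L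
    simp only [pvInnerA, pvPrefPairs, List.foldl_cons]
    by_cases h1 : PySem.Int.band cur x > ma
    · rw [if_pos h1, ih]
      congr 1; unfold pvUpdB; rw [if_pos h1]
    · rw [if_neg h1]
      by_cases h2 : PySem.Int.band cur x = ma
      · rw [if_pos h2, ih]
        congr 1; unfold pvUpdB; rw [if_neg h1, if_pos h2]
      · rw [if_neg h2, ih]
        congr 1; unfold pvUpdB; rw [if_neg h1, if_neg h2]

theorem pvMem_prefPairs : ∀ (l : List Int) (cur L : Int) (p : Int × Int),
    p ∈ pvPrefPairs cur L l ↔ ∃ q, q ≠ [] ∧ q <+: l ∧ p = (pvBandF cur q, L + (q.length : Int)) := by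
  intro l
  induction l with
  | nil =>
    intro cur L p
    simp only [pvPrefPairs]
    constructor
    · intro h; simp at h
    · rintro ⟨q, hq, hp, _⟩
      exact absurd (List.prefix_nil.mp hp) hq
  | cons x t ih =>
    intro cur L p
    simp only [pvPrefPairs, List.mem_cons, ih]
    constructor
    · rintro (rfl | ⟨q, hq, hpre, rfl⟩)
      · exact ⟨[x], by simp [pvBandF]⟩
      · refine ⟨x :: q, by simp, List.cons_prefix_cons.mpr ⟨rfl, hpre⟩, ?_⟩
        simp [pvBandF]; push_cast; ring
    · rintro ⟨q, hq, hpre, rfl⟩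
      rcases List.prefix_cons_iff.mp hpre with rfl | ⟨q', rfl, hq'⟩
      · exact absurd rfl hq
      · rcases List.eq_nil_or_concat q' with rfl | _
        · left; simp [pvBandF]
        · right
          refine ⟨q', ?_, hq', ?_⟩
          · rintro rfl; simp at *
          · simp [pvBandF]; push_cast; ring
      
theorem pvBandF_head (x : Int) (q : List Int) : pvBandF x (x :: q) = pvAndL (x :: q) := by
  simp [pvBandF, pvAndL, PySem.Int.band_self]

-- the pairs seen by A's inner loop started at the head of a suffix are exactly
-- the pairs of the nonempty prefixes of that suffix
theorem pvInnerA_pairs (x : Int) (t : List Int) (p : Int × Int) :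
    p ∈ pvPrefPairs x 0 (x :: t) ↔ ∃ q, q ≠ [] ∧ q <+: (x :: t) ∧ p = pvPairOf q := by
  rw [pvMem_prefPairs]
  constructor
  · rintro ⟨q, hq, hpre, rfl⟩
    refine ⟨q, hq, hpre, ?_⟩
    rcases List.prefix_cons_iff.mp hpre with rfl | ⟨q', rfl, _⟩
    · exact absurd rfl hq
    · rw [pvBandF_head]; simp [pvPairOf]
  · rintro ⟨q, hq, hpre, rfl⟩
    refine ⟨q, hq, hpre, ?_⟩
    rcases List.prefix_cons_iff.mp hpre with rfl | ⟨q', rfl, _⟩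
    · exact absurd rfl hq
    · rw [pvBandF_head]; simp [pvPairOf]

theorem pvOuterA_good : ∀ (r : List Int) (ma ml : Int),
    pvLe (ma, ml) (pvOuterA ma ml r) ∧
    (pvOuterA ma ml r = (ma, ml) ∨ ∃ t, t ≠ [] ∧ t <:+: r ∧ pvOuterA ma ml r = pvPairOf t) ∧
    (∀ t, t ≠ [] → t <:+: r → pvLe (pvPairOf t) (pvOuterA ma ml r)) := by
  intro r
  induction r with
  | nil =>
    intro ma ml
    refine ⟨pvLe_refl _, Or.inl rfl, ?_⟩
    intro t ht hti
    exact absurd (List.infix_nil.mp hti) ht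
  | cons x t ih =>
    intro ma ml
    have hs : pvInnerA x ma ml 0 (x :: t) = (pvPrefPairs x 0 (x :: t)).foldl pvUpdB (ma, ml) :=
      pvInnerA_eq_fold _ _ _ _ _
    have houter : pvOuterA ma ml (x :: t) = pvOuterA (pvInnerA x ma ml 0 (x :: t)).1 (pvInnerA x ma ml 0 (x :: t)).2 t := rfl
    set s := pvInnerA x ma ml 0 (x :: t) with hsdef
    have hle1 : pvLe (ma, ml) s := by rw [hs]; exact pvFold_le_init _ _
    have hscases : s = (ma, ml) ∨ ∃ q, q ≠ [] ∧ q <+: (x :: t) ∧ s = pvPairOf q := by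
      rw [hs]
      rcases pvFold_cases (pvPrefPairs x 0 (x :: t)) (ma, ml) with h | h
      · exact Or.inl h
      · exact Or.inr ((pvInnerA_pairs x t _).mp h)
    have hpref : ∀ q, q ≠ [] → q <+: (x :: t) → pvLe (pvPairOf q) s := by
      intro q hq hqp
      rw [hs]
      exact pvFold_le_mem _ _ _ ((pvInnerA_pairs x t _).mpr ⟨q, hq, hqp, rfl⟩)
    obtain ⟨ihle, ihcases, ihub⟩ := ih s.1 s.2
    rw [houter]
    have hseta : (s.1, s.2) = s := rfl
    rw [hseta] at ihle ihcases
    refine ⟨pvLe_trans hle1 ihle, ?_, ?_⟩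
    · rcases ihcases with heq | ⟨u, hu, hui, heq⟩
      · rw [heq]
        rcases hscases with h | ⟨q, hq, hqp, h⟩
        · exact Or.inl h
        · exact Or.inr ⟨q, hq, hqp.isInfix, h⟩
      · exact Or.inr ⟨u, hu, List.infix_cons hui, heq⟩
    · intro u hu hui
      rcases List.infix_cons_iff.mp hui with h | h
      · exact pvLe_trans (hpref u hu h) ihle
      · exact ihub u hu h

-- ---- side B ----

-- the body of B's dictionary-building loop
def pvStepF (x : Int) (d : PySem.Dict Int Int) (p : Int × Int) : PySem.Dict Int Int :=
  match PySem.Dict.get? d (PySem.Int.band p.1 x) with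
  | none => d.insert (PySem.Int.band p.1 x) (p.2 + 1)
  | some u => if u < p.2 + 1 then d.insert (PySem.Int.band p.1 x) (p.2 + 1) else d

theorem pvStepB_eq (x : Int) (cur : PySem.Dict Int Int) :
    pvStepB x cur = cur.items.foldl (pvStepF x) (PySem.Dict.insert PySem.Dict.empty x 1) := rfl

theorem pvStepF_mem (x : Int) (d : PySem.Dict Int Int) (q p : Int × Int)
    (h : p ∈ (pvStepF x d q).items) :
    p ∈ d.items ∨ p = (PySem.Int.band q.1 x, q.2 + 1) := by
  unfold pvStepF at h
  rcases hg : PySem.Dict.get? d (PySem.Int.band q.1 x) with _ | u <;> simp only [hg] at h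
  · rcases (PySem.Dict.mem_items_insert _ _ _ _).mp h with h' | h'
    · exact Or.inr h'
    · exact Or.inl h'.1
  · split_ifs at h
    · rcases (PySem.Dict.mem_items_insert _ _ _ _).mp h with h' | h'
      · exact Or.inr h'
      · exact Or.inl h'.1
    · exact Or.inl h

theorem pvFoldStep_mem (x : Int) : ∀ (l : List (Int × Int)) (d : PySem.Dict Int Int) (p : Int × Int),
    p ∈ (l.foldl (pvStepF x) d).items →
    p ∈ d.items ∨ ∃ q ∈ l, p = (PySem.Int.band q.1 x, q.2 + 1) := by
  intro l
  induction l with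
  | nil => intro d p h; exact Or.inl h
  | cons q t ih =>
    intro d p h
    rcases ih (pvStepF x d q) p h with h' | ⟨q', hq', rfl⟩
    · rcases pvStepF_mem x d q p h' with h'' | h''
      · exact Or.inl h''
      · exact Or.inr ⟨q, List.mem_cons_self, h''⟩
    · exact Or.inr ⟨q', List.mem_cons_of_mem q hq', rfl⟩

theorem pvStepF_mono (x : Int) (d : PySem.Dict Int Int) (q : Int × Int) (k v : Int)
    (h : PySem.Dict.get? d k = some v) :
    ∃ v', PySem.Dict.get? (pvStepF x d q) k = some v' ∧ v ≤ v' := by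
  unfold pvStepF
  rcases hg : PySem.Dict.get? d (PySem.Int.band q.1 x) with _ | u <;> simp only [hg]
  · by_cases hk : k = PySem.Int.band q.1 x
    · rw [hk, hg] at h; cases h
    · exact ⟨v, by rw [PySem.Dict.get?_insert (k' := k), if_neg hk]; exact h, le_refl v⟩
  · split_ifs with hlt
    · by_cases hk : k = PySem.Int.band q.1 x
      · subst hk
        rw [hg] at h
        cases h
        exact ⟨q.2 + 1, PySem.Dict.get?_insert_self _ _ _, by omega⟩
      · exact ⟨v, by rw [PySem.Dict.get?_insert (k' := k), if_neg hk]; exact h, le_refl v⟩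
    · exact ⟨v, h, le_refl v⟩

theorem pvFoldStep_mono (x : Int) : ∀ (l : List (Int × Int)) (d : PySem.Dict Int Int) (k v : Int),
    PySem.Dict.get? d k = some v →
    ∃ v', PySem.Dict.get? (l.foldl (pvStepF x) d) k = some v' ∧ v ≤ v' := by
  intro l
  induction l with
  | nil => intro d k v h; exact ⟨v, h, le_refl v⟩
  | cons q t ih =>
    intro d k v h
    obtain ⟨v1, hv1, hle1⟩ := pvStepF_mono x d q k v h
    obtain ⟨v', hv', hle'⟩ := ih (pvStepF x d q) k v1 hv1
    exact ⟨v', hv', le_trans hle1 hle'⟩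

theorem pvFoldStep_hit (x : Int) : ∀ (l : List (Int × Int)) (d : PySem.Dict Int Int) (q : Int × Int),
    q ∈ l →
    ∃ v', PySem.Dict.get? (l.foldl (pvStepF x) d) (PySem.Int.band q.1 x) = some v' ∧ q.2 + 1 ≤ v' := by
  intro l
  induction l with
  | nil => intro d q h; simp at h
  | cons q0 t ih =>
    intro d q h
    rcases List.mem_cons.mp h with rfl | h
    · have : ∃ v1, PySem.Dict.get? (pvStepF x d q) (PySem.Int.band q.1 x) = some v1 ∧ q.2 + 1 ≤ v1 := by
        unfold pvStepF
        rcases hg : PySem.Dict.get? d (PySem.Int.band q.1 x) with _ | u <;> simp only [hg]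
        · exact ⟨q.2 + 1, PySem.Dict.get?_insert_self _ _ _, le_refl _⟩
        · split_ifs with hlt
          · exact ⟨q.2 + 1, PySem.Dict.get?_insert_self _ _ _, le_refl _⟩
          · exact ⟨u, hg, by omega⟩
      obtain ⟨v1, hv1, hle1⟩ := this
      obtain ⟨v', hv', hle'⟩ := pvFoldStep_mono x t (pvStepF x d q) _ v1 hv1
      exact ⟨v', hv', le_trans hle1 hle'⟩
    · exact ih (pvStepF x d q0) q h

-- items of the initial dictionary {x: 1}
theorem pvInit_items (x : Int) (p : Int × Int) :
    p ∈ (PySem.Dict.insert (PySem.Dict.empty) x 1 : PySem.Dict Int Int).items → p = (x, 1) := by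
  intro h
  rcases (PySem.Dict.mem_items_insert _ _ _ _).mp h with h' | h'
  · exact h'
  · exact absurd h'.1 (by simp [PySem.Dict.empty] at *)

theorem pvStepB_src (x : Int) (cur : PySem.Dict Int Int) (p : Int × Int)
    (h : p ∈ (pvStepB x cur).items) :
    p = (x, 1) ∨ ∃ q ∈ cur.items, p = (PySem.Int.band q.1 x, q.2 + 1) := by
  rw [pvStepB_eq] at h
  rcases pvFoldStep_mem x cur.items _ p h with h' | h'
  · exact Or.inl (pvInit_items x p h')
  · exact Or.inr h'

theorem pvStepB_dom (x : Int) (cur : PySem.Dict Int Int) (q : Int × Int) (hq : q ∈ cur.items) :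
    ∃ p ∈ (pvStepB x cur).items, p.1 = PySem.Int.band q.1 x ∧ q.2 + 1 ≤ p.2 := by
  obtain ⟨v', hv', hle⟩ := pvFoldStep_hit x cur.items (PySem.Dict.insert PySem.Dict.empty x 1) q hq
  rw [← pvStepB_eq] at hv'
  exact ⟨(PySem.Int.band q.1 x, v'), PySem.Dict.mem_items_of_get?_eq_some _ hv', rfl, hle⟩

theorem pvStepB_self (x : Int) (cur : PySem.Dict Int Int) :
    ∃ p ∈ (pvStepB x cur).items, p.1 = x ∧ 1 ≤ p.2 := by
  obtain ⟨v', hv', hle⟩ := pvFoldStep_mono x cur.items (PySem.Dict.insert PySem.Dict.empty x 1) x 1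
    (PySem.Dict.get?_insert_self _ _ _)
  rw [← pvStepB_eq] at hv'
  exact ⟨(x, v'), PySem.Dict.mem_items_of_get?_eq_some _ hv', rfl, hle⟩

-- AND of a nonempty list extended on the right
theorem pvAndL_concat (u : List Int) (x : Int) (hu : u ≠ []) :
    pvAndL (u ++ [x]) = PySem.Int.band (pvAndL u) x := by
  cases u with
  | nil => exact absurd rfl hu
  | cons y u' => simp [pvAndL, pvBandF]

theorem pvPairOf_singleton (x : Int) : pvPairOf [x] = (x, 1) := by
  simp [pvPairOf, pvAndL, pvBandF]

theorem pvPairOf_concat (u : List Int) (x : Int) (hu : u ≠ []) :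
    pvPairOf (u ++ [x]) = (PySem.Int.band (pvAndL u) x, (u.length : Int) + 1) := by
  simp [pvPairOf, pvAndL_concat u x hu]

theorem pvLoopB_good : ∀ (r pfx : List Int) (cur : PySem.Dict Int Int) (ma ml : Int),
    (∀ p ∈ cur.items, ∃ t, t ≠ [] ∧ t <:+ pfx ∧ p = pvPairOf t) →
    (∀ t, t ≠ [] → t <:+ pfx → ∃ p ∈ cur.items, p.1 = pvAndL t ∧ (t.length : Int) ≤ p.2) →
    pvLe (0, 0) (ma, ml) →
    ((ma, ml) = (0, 0) ∨ ∃ t, t ≠ [] ∧ t <:+: pfx ∧ (ma, ml) = pvPairOf t) →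
    (∀ t, t ≠ [] → t <:+: pfx → pvLe (pvPairOf t) (ma, ml)) →
    pvGood (pfx ++ r) (pvLoopB cur ma ml r) := by
  intro r
  induction r with
  | nil =>
    intro pfx cur ma ml _ _ h3 h4 h5
    rw [List.append_nil]
    exact ⟨h3, h4, h5⟩
  | cons x t ih =>
    intro pfx cur ma ml ha hb h3 h4 h5
    have hloop : pvLoopB cur ma ml (x :: t) =
        pvLoopB (pvStepB x cur) ((pvStepB x cur).items.foldl pvUpdB (ma, ml)).1
          ((pvStepB x cur).items.foldl pvUpdB (ma, ml)).2 t := rfl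
    set nxt := pvStepB x cur with hnxt
    set s := nxt.items.foldl pvUpdB (ma, ml) with hsdef
    -- (a') every dictionary entry is the pair of a nonempty suffix of pfx ++ [x]
    have ha' : ∀ p ∈ nxt.items, ∃ t', t' ≠ [] ∧ t' <:+ (pfx ++ [x]) ∧ p = pvPairOf t' := by
      intro p hp
      rcases pvStepB_src x cur p hp with rfl | ⟨q, hq, rfl⟩
      · exact ⟨[x], by simp, List.suffix_append pfx [x], (pvPairOf_singleton x).symm⟩
      · obtain ⟨u, hu, hus, rfl⟩ := ha q hq
        refine ⟨u ++ [x], by simp, ?_, ?_⟩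
        · obtain ⟨w, rfl⟩ := hus
          exact ⟨w, by simp⟩
        · rw [pvPairOf_concat u x hu]; rfl
    -- (b') every nonempty suffix of pfx ++ [x] is dominated by a dictionary entry
    have hb' : ∀ t', t' ≠ [] → t' <:+ (pfx ++ [x]) →
        ∃ p ∈ nxt.items, p.1 = pvAndL t' ∧ (t'.length : Int) ≤ p.2 := by
      intro t' ht' hts
      rcases List.suffix_concat_iff.mp hts with rfl | ⟨u, rfl, hu⟩
      · exact absurd rfl ht'
      · rcases List.eq_nil_or_concat' u with rfl | _
        · obtain ⟨p, hp, hp1, hp2⟩ := pvStepB_self x cur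
          refine ⟨p, hp, ?_, ?_⟩
          · rw [hp1]; simp [pvAndL, pvBandF]
          · simpa using hp2
        · have hune : u ≠ [] := by rintro rfl; simp_all
          obtain ⟨q, hq, hq1, hq2⟩ := hb u hune hu
          obtain ⟨p, hp, hp1, hp2⟩ := pvStepB_dom x cur q hq
          refine ⟨p, hp, ?_, ?_⟩
          · rw [hp1, hq1, ← pvAndL_concat u x hune]
          · have : ((u ++ [x]).length : Int) = (u.length : Int) + 1 := by
              push_cast [List.length_append]
              simp
            omega
    -- the state after the update loop
    have hle1 : pvLe (ma, ml) s := pvFold_le_init _ _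
    have h3' : pvLe (0, 0) s := pvLe_trans h3 hle1
    have h4' : s = (0, 0) ∨ ∃ t', t' ≠ [] ∧ t' <:+: (pfx ++ [x]) ∧ s = pvPairOf t' := by
      rcases pvFold_cases nxt.items (ma, ml) with h | h
      · rw [hsdef, h]
        rcases h4 with h' | ⟨t', ht', hti, h'⟩
        · exact Or.inl h'
        · exact Or.inr ⟨t', ht', List.infix_append_of_infix_left hti, h'⟩
      · obtain ⟨t', ht', hts, hpe⟩ := ha' _ h
        exact Or.inr ⟨t', ht', hts.isInfix, by rw [hsdef, hpe]⟩
    have h5' : ∀ t', t' ≠ [] → t' <:+: (pfx ++ [x]) → pvLe (pvPairOf t') s := by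
      intro t' ht' hti
      rcases List.infix_concat_iff.mp hti with hts | hti'
      · obtain ⟨p, hp, hp1, hp2⟩ := hb' t' ht' hts
        exact pvLe_trans (Or.inr ⟨hp1.symm, hp2⟩) (pvFold_le_mem _ _ _ hp)
      · exact pvLe_trans (h5 t' ht' hti') hle1
    have key : pfx ++ x :: t = (pfx ++ [x]) ++ t := by simp
    rw [key, hloop]
    exact ih (pfx ++ [x]) nxt s.1 s.2 ha' hb' h3' h4' h5' 

-- ===== VERDICT (by name: the statement is the Claim_ definition above) =====
theorem pvGoodA (nums : List Int) : pvGood nums (pvOuterA 0 0 nums) := by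
  obtain ⟨hle, hcases, hub⟩ := pvOuterA_good nums 0 0
  exact ⟨hle, by simpa using hcases, hub⟩

theorem pvGoodB (nums : List Int) : pvGood nums (pvLoopB PySem.Dict.empty 0 0 nums) := by
  have h := pvLoopB_good nums [] PySem.Dict.empty 0 0
    (by intro p hp; simp [PySem.Dict.empty] at hp)
    (by intro t ht hts; exact absurd (List.suffix_nil.mp hts) ht)
    (pvLe_refl _) (Or.inl rfl)
    (by intro t ht hti; exact absurd (List.infix_nil.mp hti) ht)
  simpa using h

theorem longestSubarray1_spec : Claim_equal_longestSubarray1 := by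
  intro nums _
  unfold Spec_longestSubarray1 longestSubarray1 longestSubarray1_alt
  rw [pvGood_unique (pvGoodA nums) (pvGoodB nums)]
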